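-- pv_equiv track=rewrite | github.com/calle2021/aoc | d14/d14_part2.py | bfs
-- ===== SOURCE A (Python) =====
-- from collections import deque
--
-- def bfs(s, idxs):
--     q = deque([s])
--     seen = set()
--     while q:
--         curr = q.popleft()
--         if curr in seen:
--             continue
--         seen.add(curr)
--
--         for n in idxs:
--             zero = curr[:n] + "0" + curr[n + 1:]
--             one = curr[:n] + "1" + curr[n + 1:]
--             q.append(zero)
--             q.append(one)
--     return seen
--
-- s = 0
-- ===== SOURCE B (Python) =====
-- def bfs(s, idxs):
--     result = [s]
--     while True:
--         image = [c[:n] + d + c[n + 1:] for c in result for n in idxs for d in "01"]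
--         bigger = list(dict.fromkeys(result + image))
--         if len(bigger) == len(result):
--             return set(result)
--         result = bigger
-- ===== Notes on version B (the rewrite author's own statement) =====
-- stated objective: simpler
-- what changed: Replaces the deque/visited-set worklist BFS with a naive Kleene fixed-point iteration: each round appends (dict.fromkeys-deduplicated) the image of the WHOLE current list under all one-position 0/1 substitutions and stops when the list no longer grows, so there is no queue, no per-node seen check and no collections import.
import Mathlib
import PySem

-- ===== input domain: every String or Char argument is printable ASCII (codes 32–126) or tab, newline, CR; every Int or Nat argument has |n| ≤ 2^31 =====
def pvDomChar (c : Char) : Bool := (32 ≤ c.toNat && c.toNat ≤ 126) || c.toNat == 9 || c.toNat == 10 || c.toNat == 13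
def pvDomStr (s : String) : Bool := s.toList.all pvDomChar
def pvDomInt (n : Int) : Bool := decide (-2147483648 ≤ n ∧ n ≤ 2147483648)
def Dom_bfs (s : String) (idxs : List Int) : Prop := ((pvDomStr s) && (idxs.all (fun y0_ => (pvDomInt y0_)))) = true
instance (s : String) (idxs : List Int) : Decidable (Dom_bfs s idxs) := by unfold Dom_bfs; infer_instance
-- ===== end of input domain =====

-- B replaces A's deque BFS by a naive Kleene fixed-point iteration (union with the image of the
-- whole set each round until it stops growing): no queue, no frontier (objective: simpler, not faster).


-- ===== PORT A =====
-- shared helper: the slicing expression  curr[:n] + d + curr[n+1:]  both Pythons build their children with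
def subst (curr : String) (n : Int) (d : Char) : String :=
  String.ofList (PySem.Chars.slice curr.toList none (some n) ++ [d] ++
                 PySem.Chars.slice curr.toList (some (n + 1)) none)

-- totality guards for the two loops: the strings A's BFS can reach over s and idxs all have
-- length ≤ growBound s idxs, so searchSpace bounds how many distinct strings can ever be seen
def padBound (n : Int) : Nat := if 0 ≤ n then n.toNat + 1 else (-n).toNat

def growBound (s : String) (idxs : List Int) : Nat :=
  idxs.foldl (fun acc n => max acc (padBound n)) s.toList.length

def searchSpace (s : String) (idxs : List Int) : Nat :=
  (s.toList.length + 3) ^ (growBound s idxs + 1)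

-- A's while-loop: q is the deque (popleft from the front, append at the back), seen the visited set;
-- the fuel argument only makes the loop total — Pre_bfs guarantees it is never exhausted.
def bfsLoop (idxs : List Int) : Nat → List String → PySem.Set String → PySem.Set String
  | 0, _, seen => seen
  | _ + 1, [], seen => seen
  | fuel + 1, curr :: q, seen =>
    if PySem.Set.contains seen curr then bfsLoop idxs fuel q seen
    else
      bfsLoop idxs fuel
        (idxs.foldl (fun q n => (q ++ [subst curr n '0']) ++ [subst curr n '1']) q)
        (PySem.Set.add seen curr)

def bfs (s : String) (idxs : List Int) : List String :=
  bfsLoop idxs (1 + 2 * idxs.length * searchSpace s idxs) [s] PySem.Set.empty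

-- ===== PORT B =====
-- Kleene iteration: each round, bigger = ordered dedup of result followed by its whole image (every
-- one-position substitution of every string of result, via dict.fromkeys); stop as soon as the list
-- did not grow, and hand the final list to set(). The fuel argument only makes the loop total.
def bfsKleene (idxs : List Int) : Nat → List String → List String
  | 0, result => result
  | fuel + 1, result =>
    let image := result.flatMap (fun c =>
      idxs.flatMap (fun n => ['0', '1'].map (fun d => subst c n d)))
    let bigger := PySem.List.dedup (result ++ image)
    if bigger.length = result.length then result else bfsKleene idxs fuel bigger

def bfs_alt (s : String) (idxs : List Int) : List String :=
  PySem.Set.ofList (bfsKleene idxs (1 + searchSpace s idxs) [s])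

-- ===== PRECONDITION & SPEC =====
-- A's loop runs forever exactly when -1 ∈ idxs (the slice curr[n+1:] is then the whole string, so
-- every step creates longer strings); Pre_ excludes exactly those diverging inputs.
def Pre_bfs (s : String) (idxs : List Int) : Prop := ∀ n ∈ idxs, n ≠ -1
instance (s : String) (idxs : List Int) : Decidable (Pre_bfs s idxs) := by unfold Pre_bfs; infer_instance
def pvWitness_bfs : String × List Int := ("ab", [0, 1])
def Spec_bfs (s : String) (idxs : List Int) (out : List String) : Prop := out = bfs_alt s idxs
instance (s : String) (idxs : List Int) (out : List String) : Decidable (Spec_bfs s idxs out) := by unfold Spec_bfs; infer_instance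

-- ===== CLAIM (what is proved, stated in full; the proofs are below) =====
def Claim_equal_bfs : Prop := ∀ (s : String) (idxs : List Int), Dom_bfs s idxs → Pre_bfs s idxs → Spec_bfs s idxs (bfs s idxs)

-- ===== LEMMAS AND PROOFS =====

-- the list of children a node generates, in generation order
def chA (idxs : List Int) (c : String) : List String :=
  idxs.flatMap (fun n => [subst c n '0', subst c n '1'])

-- proof-only intermediate program: a level-synchronous frontier BFS, bridged to A on one side
-- (main_bridge) and to B's Kleene iteration on the other (kleene_eq_front)
def frontLoop (idxs : List Int) : Nat → List String → PySem.Set String → PySem.Set String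
  | 0, _, result => result
  | _ + 1, [], result => result
  | fuel + 1, curr :: frontier, result =>
    let st := (curr :: frontier).foldl (fun st curr =>
      idxs.foldl (fun st n =>
        ['0', '1'].foldl (fun st d =>
          let t := subst curr n d
          if PySem.Set.contains st.1 t then st else (PySem.Set.add st.1 t, st.2 ++ [t])) st) st)
      (result, ([] : List String))
    frontLoop idxs fuel st.2 st.1

-- one frontier round: sift the candidate list, keeping first occurrences of new strings
def sift : List String → PySem.Set String → PySem.Set String × List String
  | [], seen => (seen, [])
  | t :: ts, seen =>
    if PySem.Set.contains seen t then sift ts seen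
    else ((sift ts (PySem.Set.add seen t)).1, t :: (sift ts (PySem.Set.add seen t)).2)

lemma contains_eq_true_iff (s : PySem.Set String) (x : String) :
    PySem.Set.contains s x = true ↔ x ∈ s := by simp [PySem.Set.contains]

lemma contains_false_iff (s : PySem.Set String) (x : String) :
    PySem.Set.contains s x = false ↔ x ∉ s := by simp [PySem.Set.contains]

lemma add_eq_append (s : PySem.Set String) (x : String) (h : x ∉ s) :
    PySem.Set.add s x = s ++ [x] := by simp [PySem.Set.add, PySem.Set.contains, h]

lemma push_eq (idxs : List Int) (c : String) (q : List String) :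
    idxs.foldl (fun q n => (q ++ [subst c n '0']) ++ [subst c n '1']) q = q ++ chA idxs c := by
  have h := PySem.List.foldl_congr_mem
    (l := idxs) (init := q)
    (f := fun q n => (q ++ [subst c n '0']) ++ [subst c n '1'])
    (g := fun q n => q ++ [subst c n '0', subst c n '1'])
    (by intro acc x _; simp)
  rw [h, PySem.List.foldl_append_eq_flatMap]; rfl

lemma loop_nil (idxs : List Int) (f : Nat) (seen : PySem.Set String) :
    bfsLoop idxs f [] seen = seen := by cases f <;> rfl

lemma front_nil (idxs : List Int) (f : Nat) (seen : PySem.Set String) :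
    frontLoop idxs f [] seen = seen := by cases f <;> rfl

-- A pops one whole level cs (fuel = one unit per element) and ends with the new strings' children queued
lemma level (idxs : List Int) (f : Nat) :
    ∀ (cs rest : List String) (seen : PySem.Set String),
      bfsLoop idxs (cs.length + f) (cs ++ rest) seen =
        bfsLoop idxs f (rest ++ (sift cs seen).2.flatMap (chA idxs)) (sift cs seen).1
  | [], rest, seen => by simp [sift]
  | t :: ts, rest, seen => by
    have hlen : (t :: ts).length + f = (ts.length + f) + 1 := by simp; omega
    rw [hlen]
    show (if PySem.Set.contains seen t then _ else _) = _
    by_cases h : PySem.Set.contains seen t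
    · have hm : t ∈ seen := (contains_eq_true_iff _ _).mp h
      rw [if_pos h]
      simp only [List.append_eq]
      rw [level idxs f ts rest seen]
      simp [sift, hm]
    · have hm : t ∉ seen := (contains_false_iff _ _).mp (by simpa using h)
      rw [if_neg h, push_eq]
      simp only [List.append_eq]
      have hassoc : (ts ++ rest) ++ chA idxs t = ts ++ (rest ++ chA idxs t) := by simp
      rw [hassoc, level idxs f ts (rest ++ chA idxs t) (PySem.Set.add seen t)]
      simp [sift, hm]

-- sift's set is the old set plus the new strings, in order
lemma sift_one : ∀ (cs : List String) (seen : PySem.Set String),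
    (sift cs seen).1 = seen ++ (sift cs seen).2
  | [], seen => by simp [sift]
  | t :: ts, seen => by
    by_cases h : PySem.Set.contains seen t
    · simp only [sift, if_pos h]; exact sift_one ts seen
    · have hm : t ∉ seen := (contains_false_iff _ _).mp (by simpa using h)
      simp only [sift, if_neg h]
      rw [sift_one ts (PySem.Set.add seen t), add_eq_append _ _ hm]
      simp

lemma sift_sub : ∀ (cs : List String) (seen : PySem.Set String), (sift cs seen).2 ⊆ cs
  | [], _ => by simp [sift]
  | t :: ts, seen => by
    by_cases h : PySem.Set.contains seen t
    · simp only [sift, if_pos h]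
      intro x hx
      exact List.mem_cons_of_mem _ (sift_sub ts seen hx)
    · simp only [sift, if_neg h]
      intro x hx
      rw [List.mem_cons] at hx
      rcases hx with rfl | hx
      · exact List.mem_cons_self
      · exact List.mem_cons_of_mem _ (sift_sub ts _ hx)

lemma sift_nodup : ∀ (cs : List String) (seen : PySem.Set String),
    seen.Nodup → (sift cs seen).1.Nodup
  | [], _, h => h
  | t :: ts, seen, h => by
    by_cases hc : PySem.Set.contains seen t
    · simp only [sift, if_pos hc]; exact sift_nodup ts seen h
    · simp only [sift, if_neg hc]
      have ht : t ∉ seen := (contains_false_iff _ _).mp (by simpa using hc)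
      apply sift_nodup ts
      rw [add_eq_append _ _ ht]
      simp [List.nodup_append, h]
      intro a ha hat
      exact ht (hat ▸ ha)

-- every candidate ends up inside sift's set
lemma sift_mem : ∀ (cs : List String) (seen : PySem.Set String), cs ⊆ (sift cs seen).1
  | [], _ => by simp
  | t :: ts, seen => by
    by_cases h : PySem.Set.contains seen t
    · have hm : t ∈ seen := (contains_eq_true_iff _ _).mp h
      simp only [sift, if_pos h]
      intro x hx
      rcases List.mem_cons.mp hx with rfl | hx
      · rw [sift_one]; exact List.mem_append_left _ hm
      · exact sift_mem ts seen hx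
    · simp only [sift, if_neg h]
      intro x hx
      rcases List.mem_cons.mp hx with rfl | hx
      · rw [sift_one]
        refine List.mem_append_left _ ?_
        have hm : x ∉ seen := (contains_false_iff _ _).mp (by simpa using h)
        rw [add_eq_append _ _ hm]
        simp
      · exact sift_mem ts _ hx

-- candidates already contained contribute nothing
lemma sift_skip : ∀ (a b : List String) (seen : PySem.Set String),
    a ⊆ seen → sift (a ++ b) seen = sift b seen
  | [], b, seen, _ => rfl
  | t :: ts, b, seen, h => by
    have hc : PySem.Set.contains seen t = true :=
      (contains_eq_true_iff _ _).mpr (h List.mem_cons_self)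
    simp only [List.cons_append, sift, if_pos hc]
    exact sift_skip ts b seen (fun x hx => h (List.mem_cons_of_mem _ hx))

-- B's nested frontier fold is sift of the flattened children list
lemma fold_chA (idxs : List Int) (c : String) :
    ∀ (st : PySem.Set String × List String),
      idxs.foldl (fun st n => ['0', '1'].foldl (fun st d =>
          let t := subst c n d
          if PySem.Set.contains st.1 t then st else (PySem.Set.add st.1 t, st.2 ++ [t])) st) st =
        (chA idxs c).foldl (fun st t =>
          if PySem.Set.contains st.1 t then st else (PySem.Set.add st.1 t, st.2 ++ [t])) st := by
  induction idxs with
  | nil => intro st; rfl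
  | cons n rest ih =>
    intro st
    have hch : chA (n :: rest) c = [subst c n '0', subst c n '1'] ++ chA rest c := by
      simp [chA]
    rw [List.foldl_cons, hch, List.foldl_append, ih]
    rfl

lemma sift_foldl : ∀ (cs : List String) (seen : PySem.Set String) (acc : List String),
    cs.foldl (fun st t =>
        if PySem.Set.contains st.1 t then st else (PySem.Set.add st.1 t, st.2 ++ [t]))
      (seen, acc) = ((sift cs seen).1, acc ++ (sift cs seen).2)
  | [], seen, acc => by simp [sift]
  | t :: ts, seen, acc => by
    by_cases h : PySem.Set.contains seen t
    · simp only [List.foldl_cons, sift, h, if_true]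
      exact sift_foldl ts seen acc
    · simp only [List.foldl_cons, sift, h, Bool.false_eq_true, if_false]
      rw [sift_foldl ts (PySem.Set.add seen t) (acc ++ [t])]
      simp

-- a plain Set.add fold is sift's set component
lemma add_foldl : ∀ (cs : List String) (seen : PySem.Set String),
    cs.foldl PySem.Set.add seen = (sift cs seen).1
  | [], seen => by simp [sift]
  | t :: ts, seen => by
    by_cases h : PySem.Set.contains seen t
    · have : PySem.Set.add seen t = seen := by simp [PySem.Set.add, (contains_eq_true_iff _ _).mp h]
      simp only [List.foldl_cons, this, sift, if_pos h]
      exact add_foldl ts seen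
    · simp only [List.foldl_cons, sift, h, Bool.false_eq_true, if_false]
      exact add_foldl ts (PySem.Set.add seen t)

lemma front_step (idxs : List Int) (f : Nat) (c : String) (fr : List String)
    (result : PySem.Set String) :
    frontLoop idxs (f + 1) (c :: fr) result =
      frontLoop idxs f (sift ((c :: fr).flatMap (chA idxs)) result).2
        (sift ((c :: fr).flatMap (chA idxs)) result).1 := by
  show frontLoop idxs f _ _ = _
  have hfold : ∀ (fr' : List String) (st : PySem.Set String × List String),
      fr'.foldl (fun st curr =>
        idxs.foldl (fun st n =>
          ['0', '1'].foldl (fun st d =>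
            let t := subst curr n d
            if PySem.Set.contains st.1 t then st else (PySem.Set.add st.1 t, st.2 ++ [t])) st) st) st =
      (fr'.flatMap (chA idxs)).foldl (fun st t =>
        if PySem.Set.contains st.1 t then st else (PySem.Set.add st.1 t, st.2 ++ [t])) st := by
    intro fr' st
    induction fr' generalizing st with
    | nil => rfl
    | cons x xs ih =>
      simp only [List.foldl_cons, List.flatMap_cons, List.foldl_append]
      rw [← fold_chA idxs x st]
      exact ih _
  rw [hfold, sift_foldl]
  simp

-- folding Set.add over fresh, duplicate-free elements just appends them
lemma foldl_add_self : ∀ (xs acc : List String), (∀ x ∈ xs, x ∉ acc) → xs.Nodup →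
    xs.foldl PySem.Set.add acc = acc ++ xs
  | [], acc, _, _ => by simp
  | x :: xs, acc, hfr, hnd => by
    have hx : x ∉ acc := hfr x List.mem_cons_self
    rw [List.foldl_cons, add_eq_append _ _ hx,
      foldl_add_self xs (acc ++ [x])
        (by
          intro y hy
          rw [List.mem_append, List.mem_singleton]
          push Not
          exact ⟨fun h => hfr y (List.mem_cons_of_mem _ hy) h,
            fun h => (List.nodup_cons.mp hnd).1 (h ▸ hy)⟩)
        (List.nodup_cons.mp hnd).2]
    simp

lemma ofList_self_of_nodup (xs : List String) (h : xs.Nodup) : PySem.Set.ofList xs = xs := by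
  rw [PySem.Set.ofList_eq_foldl]
  simpa using foldl_add_self xs [] (by simp) h

-- the frontier loop keeps its result duplicate-free
lemma front_nodup (idxs : List Int) : ∀ (f : Nat) (fr seen : List String),
    seen.Nodup → (frontLoop idxs f fr seen).Nodup := by
  intro f
  induction f with
  | zero => intro fr seen h; cases fr <;> exact h
  | succ f ih =>
    intro fr seen h
    match fr with
    | [] => exact h
    | c :: fr' =>
      rw [front_step]
      exact ih _ _ (sift_nodup _ _ h)

-- the bridge on B's side: Kleene iteration over the ordered dedup list = frontier BFS, given that
-- every already-expanded element's children are already inside the list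
lemma kleene_eq_front (idxs : List Int) : ∀ (f : Nat) (pre fr : List String),
    (pre ++ fr).Nodup →
    (∀ c ∈ pre, chA idxs c ⊆ pre ++ fr) →
    bfsKleene idxs f (pre ++ fr) = frontLoop idxs f fr (pre ++ fr) := by
  intro f
  induction f with
  | zero => intro pre fr _ _; cases fr <;> rfl
  | succ f ih =>
    intro pre fr hnd hcl
    have hflat : (pre ++ fr).flatMap (chA idxs) =
        pre.flatMap (chA idxs) ++ fr.flatMap (chA idxs) := by simp
    have hpre : pre.flatMap (chA idxs) ⊆ pre ++ fr := by
      intro x hx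
      rw [List.mem_flatMap] at hx
      obtain ⟨c, hc, hxc⟩ := hx
      exact hcl c hc hxc
    have hbig : PySem.List.dedup ((pre ++ fr) ++ (pre ++ fr).flatMap (chA idxs)) =
        (sift (fr.flatMap (chA idxs)) (pre ++ fr)).1 := by
      rw [PySem.List.dedup_eq_ofList, PySem.Set.ofList_eq_foldl, List.foldl_append]
      rw [show List.foldl PySem.Set.add [] (pre ++ fr) = ([] : List String) ++ (pre ++ fr) from
        foldl_add_self _ _ (by simp) hnd]
      rw [List.nil_append, add_foldl, hflat, sift_skip _ _ _ hpre]
    have hbody : bfsKleene idxs (f + 1) (pre ++ fr) =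
        (if (PySem.List.dedup ((pre ++ fr) ++ (pre ++ fr).flatMap (chA idxs))).length
            = (pre ++ fr).length
          then pre ++ fr
          else bfsKleene idxs f
            (PySem.List.dedup ((pre ++ fr) ++ (pre ++ fr).flatMap (chA idxs)))) := rfl
    rw [hbody, hbig]
    match fr with
    | [] =>
      simp only [List.flatMap_nil]
      rw [show sift [] (pre ++ []) = (pre ++ [], []) from rfl]
      simp [front_nil]
    | c :: fr' =>
      have h1 := sift_one ((c :: fr').flatMap (chA idxs)) (pre ++ c :: fr')
      set new := (sift ((c :: fr').flatMap (chA idxs)) (pre ++ c :: fr')).2 with hnew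
      have hlen : (sift ((c :: fr').flatMap (chA idxs)) (pre ++ c :: fr')).1.length =
          (pre ++ c :: fr').length + new.length := by
        rw [h1]; simp only [List.length_append, List.length_cons]
      rw [front_step]
      by_cases h0 : new = []
      · have hset : (sift ((c :: fr').flatMap (chA idxs)) (pre ++ c :: fr')).1 = pre ++ c :: fr' := by
          rw [h1, h0, List.append_nil]
        rw [if_pos (by rw [hlen, h0]; simp), ← hnew, h0, hset, front_nil]
      · rw [if_neg (by rw [hlen]; have := List.length_pos_iff.mpr h0; omega)]
        have hnd' : ((pre ++ c :: fr') ++ new).Nodup := by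
          have h2 := sift_nodup ((c :: fr').flatMap (chA idxs)) (pre ++ c :: fr') hnd
          rwa [h1] at h2
        have := ih (pre ++ c :: fr') new hnd' (by
          intro x hx y hy
          have hy1 : y ∈ (sift ((c :: fr').flatMap (chA idxs)) (pre ++ c :: fr')).1 := by
            rcases List.mem_append.mp hx with hx | hx
            · rw [sift_one]
              exact List.mem_append_left _ (hcl x hx hy)
            · exact sift_mem _ _ (by rw [List.mem_flatMap]; exact ⟨x, hx, hy⟩)
          rw [h1] at hy1
          simpa [List.append_assoc] using hy1)
        rw [← hnew, h1]
        simpa [List.append_assoc] using this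

lemma chA_len (idxs : List Int) (c : String) : (chA idxs c).length = 2 * idxs.length := by
  induction idxs with
  | nil => rfl
  | cons n rest ih => simp [chA] at ih ⊢; omega

lemma flat_len (idxs : List Int) : ∀ l : List String,
    (l.flatMap (chA idxs)).length = 2 * idxs.length * l.length
  | [] => by simp
  | c :: l => by
    simp [chA_len, flat_len idxs l]
    ring

lemma nodup_length_le (l d : List String) (h : l.Nodup) (hs : l ⊆ d) : l.length ≤ d.length := by
  calc l.length = l.toFinset.card := (List.toFinset_card_of_nodup h).symm
    _ ≤ d.toFinset.card := Finset.card_le_card (by intro x hx; simp only [List.mem_toFinset] at *; exact hs hx)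
    _ ≤ d.length := d.toFinset_card_le

-- how each Python child string decomposes, by the sign of the index
lemma subst_toList_nonneg (c : String) (n : Int) (d : Char) (h0 : 0 ≤ n) :
    (subst c n d).toList = c.toList.take n.toNat ++ d :: c.toList.drop (n.toNat + 1) := by
  rw [subst, String.toList_ofList, PySem.Chars.slice_eq_listSlice, PySem.Chars.slice_eq_listSlice,
    PySem.List.slice_to c.toList h0, PySem.List.slice_from c.toList (by omega : (0:Int) ≤ n + 1)]
  have : (n + 1).toNat = n.toNat + 1 := by omega
  rw [this]
  simp

lemma subst_toList_neg (c : String) (n : Int) (d : Char) (h0 : n ≤ -2) :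
    (subst c n d).toList = c.toList.take (c.toList.length - (-n).toNat) ++
      d :: c.toList.drop (c.toList.length - ((-n).toNat - 1)) := by
  obtain ⟨k, rfl⟩ : ∃ k : Nat, n = -(k : Int) := ⟨(-n).toNat, by omega⟩
  have hk2 : 2 ≤ k := by omega
  have hkt : (-(-(k : Int))).toNat = k := by omega
  have hk1 : -(k : Int) + 1 = -(((k - 1 : Nat) : Nat) : Int) := by omega
  rw [subst, String.toList_ofList, PySem.Chars.slice_eq_listSlice, PySem.Chars.slice_eq_listSlice]
  rw [hk1, PySem.List.slice_to_neg_natCast c.toList k (by omega),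
    PySem.List.slice_from_neg_natCast c.toList (k - 1) (by omega), hkt]
  simp

-- the children of a string only use its own characters plus the written digit
lemma subst_chars (c : String) (n : Int) (d : Char) :
    ∀ x ∈ (subst c n d).toList, x ∈ c.toList ∨ x = d := by
  intro x hx
  rw [subst, String.toList_ofList] at hx
  simp only [PySem.Chars.slice_eq_listSlice, List.mem_append, List.mem_singleton] at hx
  rcases hx with (hx | hx) | hx
  · exact Or.inl (PySem.List.mem_of_mem_slice _ _ _ hx)
  · exact Or.inr hx
  · exact Or.inl (PySem.List.mem_of_mem_slice _ _ _ hx)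

-- a child is never longer than max(len curr, padBound n) (this is where n = -1 is excluded)
lemma subst_len_le (c : String) (n : Int) (d : Char) (hne : n ≠ -1) :
    (subst c n d).toList.length ≤ max c.toList.length (padBound n) := by
  by_cases h0 : 0 ≤ n
  · rw [subst_toList_nonneg c n d h0]
    simp only [padBound, if_pos h0, List.length_append, List.length_cons, List.length_take,
      List.length_drop]
    omega
  · have h2 : n ≤ -2 := by omega
    rw [subst_toList_neg c n d h2]
    simp only [padBound, if_neg h0, List.length_append, List.length_cons, List.length_take,
      List.length_drop]
    omega

-- all character lists of length ≤ m over the alphabet A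
def lchars (A : List Char) : Nat → List (List Char)
  | 0 => [[]]
  | m + 1 => [] :: A.flatMap (fun a => (lchars A m).map (a :: ·))

lemma mem_lchars (A : List Char) : ∀ (m : Nat) (l : List Char),
    l.length ≤ m → (∀ x ∈ l, x ∈ A) → l ∈ lchars A m
  | 0, l, hlen, _ => by
    have : l = [] := List.length_eq_zero_iff.mp (by omega)
    rw [this]; exact List.mem_singleton.mpr rfl
  | m + 1, l, hlen, hA => by
    match l with
    | [] => exact List.mem_cons_self
    | a :: t =>
      refine List.mem_cons_of_mem _ ?_
      rw [List.mem_flatMap]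
      refine ⟨a, hA a List.mem_cons_self, ?_⟩
      rw [List.mem_map]
      exact ⟨t, mem_lchars A m t (by simpa using hlen)
        (fun x hx => hA x (List.mem_cons_of_mem _ hx)), rfl⟩

lemma lchars_count (A : List Char) : ∀ m : Nat,
    (lchars A m).length ≤ (A.length + 1) ^ (m + 1)
  | 0 => by simp [lchars]
  | m + 1 => by
    have ih := lchars_count A m
    have hpow : 1 ≤ (A.length + 1) ^ (m + 1) := Nat.one_le_pow _ _ (by omega)
    have hflat : ∀ A' : List Char, (A'.flatMap (fun a => (lchars A m).map (a :: ·))).length =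
        A'.length * (lchars A m).length := by
      intro A'
      induction A' with
      | nil => simp
      | cons x xs ihx => simp [ihx]; ring
    have hmul : A.length * (lchars A m).length ≤ A.length * (A.length + 1) ^ (m + 1) :=
      Nat.mul_le_mul_left _ ih
    have hpow2 : (A.length + 1) ^ (m + 1 + 1) = (A.length + 1) ^ (m + 1) * (A.length + 1) :=
      pow_succ _ _
    have hexp : (A.length + 1) ^ (m + 1) * (A.length + 1) =
        (A.length + 1) ^ (m + 1) + A.length * (A.length + 1) ^ (m + 1) := by ring
    simp only [lchars, List.length_cons, hflat]
    omega

-- the universe: all strings of length ≤ growBound over s's characters plus the two digits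
def uniSet (s : String) (idxs : List Int) : List String :=
  (lchars (s.toList ++ ['0', '1']) (growBound s idxs)).map String.ofList

lemma lchars_spec (A : List Char) : ∀ (m : Nat) (l : List Char),
    l ∈ lchars A m → l.length ≤ m ∧ ∀ x ∈ l, x ∈ A
  | 0, l, hl => by
    rw [show lchars A 0 = [[]] from rfl, List.mem_singleton] at hl
    subst hl; simp
  | m + 1, l, hl => by
    rw [show lchars A (m + 1) = [] :: A.flatMap (fun a => (lchars A m).map (a :: ·)) from rfl,
      List.mem_cons] at hl
    rcases hl with rfl | hl
    · simp
    · rw [List.mem_flatMap] at hl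
      obtain ⟨a, ha, hmem⟩ := hl
      obtain ⟨t, ht, rfl⟩ := List.mem_map.mp hmem
      obtain ⟨h1, h2⟩ := lchars_spec A m t ht
      refine ⟨by simpa using Nat.succ_le_succ h1, ?_⟩
      intro y hy
      rcases List.mem_cons.mp hy with rfl | hy
      · exact ha
      · exact h2 y hy

lemma mem_uniSet (s : String) (idxs : List Int) (c : String)
    (hlen : c.toList.length ≤ growBound s idxs)
    (hA : ∀ x ∈ c.toList, x ∈ s.toList ++ ['0', '1']) : c ∈ uniSet s idxs := by
  rw [uniSet, List.mem_map]
  exact ⟨c.toList, mem_lchars _ _ _ hlen hA, String.ofList_toList⟩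

lemma uniSet_count (s : String) (idxs : List Int) :
    (uniSet s idxs).length ≤ searchSpace s idxs := by
  rw [uniSet, List.length_map, searchSpace]
  have := lchars_count (s.toList ++ ['0', '1']) (growBound s idxs)
  simpa using this

lemma growBound_base (s : String) (idxs : List Int) :
    s.toList.length ≤ growBound s idxs :=
  (PySem.List.le_foldl_max_nat idxs padBound s.toList.length).1

lemma growBound_mem (s : String) (idxs : List Int) (n : Int) (hn : n ∈ idxs) :
    padBound n ≤ growBound s idxs :=
  (PySem.List.le_foldl_max_nat idxs padBound s.toList.length).2 n hn

-- closure of the universe under the children function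
lemma uniSet_closed (s : String) (idxs : List Int) (hPre : ∀ n ∈ idxs, n ≠ -1) :
    ∀ c ∈ uniSet s idxs, chA idxs c ⊆ uniSet s idxs := by
  intro c hc x hx
  rw [chA, List.mem_flatMap] at hx
  obtain ⟨n, hn, hxn⟩ := hx
  obtain ⟨lc, hlc, hceq⟩ := List.mem_map.mp hc
  have hctl : c.toList.length ≤ growBound s idxs ∧
      ∀ y ∈ c.toList, y ∈ s.toList ++ ['0', '1'] := by
    have := lchars_spec _ _ _ hlc
    subst hceq
    rwa [String.toList_ofList]
  have hclose : ∀ d : Char, d ∈ (['0', '1'] : List Char) → subst c n d ∈ uniSet s idxs := by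
    intro d hd
    apply mem_uniSet
    · have h1 := subst_len_le c n d (hPre n hn)
      have h2 := growBound_mem s idxs n hn
      omega
    · intro y hy
      rcases subst_chars c n d y hy with h | h
      · exact hctl.2 y h
      · subst h
        rw [List.mem_append]
        exact Or.inr hd
  rw [List.mem_cons, List.mem_singleton] at hxn
  rcases hxn with rfl | rfl
  · exact hclose '0' (by simp)
  · exact hclose '1' (by simp)

-- A's dedup-at-pop queue BFS = dedup-before-push frontier BFS, given a closed universe U
lemma main_bridge (idxs : List Int) (U : List String)
    (hcl : ∀ c ∈ U, chA idxs c ⊆ U) :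
    ∀ (d : Nat) (fr : List String) (seen : PySem.Set String) (fA fB : Nat),
      seen.Nodup → seen ⊆ U → fr ⊆ U →
      U.length ≤ seen.length + d →
      (fr.flatMap (chA idxs)).length + 2 * idxs.length * d ≤ fA → d ≤ fB →
      bfsLoop idxs fA (fr.flatMap (chA idxs)) seen = frontLoop idxs fB fr seen := by
  intro d
  induction d using Nat.strong_induction_on with
  | _ d IH =>
    intro fr seen fA fB hnd hsU hfrU hd hfA hfB
    match fr with
    | [] => simp [loop_nil, front_nil]
    | c :: fr' =>
      rcases hsp : sift ((c :: fr').flatMap (chA idxs)) seen with ⟨seenS, nfS⟩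
      have hcsU : (c :: fr').flatMap (chA idxs) ⊆ U := by
        intro x hx
        rw [List.mem_flatMap] at hx
        obtain ⟨y, hy, hxy⟩ := hx
        exact hcl y (hfrU hy) hxy
      have hS1 : seenS = (sift ((c :: fr').flatMap (chA idxs)) seen).1 := by rw [hsp]
      have hS2 : nfS = (sift ((c :: fr').flatMap (chA idxs)) seen).2 := by rw [hsp]
      have hseen'nd : seenS.Nodup := by rw [hS1]; exact sift_nodup _ seen hnd
      have hnfsub : nfS ⊆ (c :: fr').flatMap (chA idxs) := by rw [hS2]; exact sift_sub _ seen
      have hseen'U : seenS ⊆ U := by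
        rw [hS1, sift_one]
        intro x hx
        rcases List.mem_append.mp hx with h | h
        · exact hsU h
        · exact hcsU (sift_sub _ seen h)
      have hlen' : seenS.length = seen.length + nfS.length := by
        rw [hS1, sift_one, ← hS2]; simp
      have hnfd : nfS.length ≤ d := by
        have := nodup_length_le seenS U hseen'nd hseen'U
        omega
      have hfA' : ((c :: fr').flatMap (chA idxs)).length ≤ fA := by
        have h0 : 0 ≤ 2 * idxs.length * d := Nat.zero_le _
        omega
      have hL : bfsLoop idxs fA ((c :: fr').flatMap (chA idxs)) seen =
          bfsLoop idxs (fA - ((c :: fr').flatMap (chA idxs)).length)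
            (nfS.flatMap (chA idxs)) seenS := by
        have h1 : bfsLoop idxs fA ((c :: fr').flatMap (chA idxs)) seen =
            bfsLoop idxs (((c :: fr').flatMap (chA idxs)).length +
              (fA - ((c :: fr').flatMap (chA idxs)).length))
              ((c :: fr').flatMap (chA idxs) ++ []) seen := by
          rw [List.append_nil]
          congr 1
          omega
        rw [h1, level, hsp]
        simp
      rw [hL]
      cases fB with
      | zero =>
        have hd0 : d = 0 := by omega
        have hnf0 : nfS = [] := List.length_eq_zero_iff.mp (by omega)
        rw [hnf0]
        simp only [List.flatMap_nil, loop_nil]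
        have hse : seenS = seen := by rw [hS1, sift_one, ← hS2, hnf0, List.append_nil]
        rw [hse]
        rfl
      | succ f =>
        rw [front_step, hsp]
        by_cases hnf0 : nfS = []
        · rw [hnf0]
          simp only [List.flatMap_nil, loop_nil, front_nil]
        · have hd1 : 1 ≤ nfS.length := List.length_pos_iff.mpr hnf0
          have hnfU : nfS ⊆ U := fun x hx => hcsU (hnfsub hx)
          have hflat : (nfS.flatMap (chA idxs)).length = 2 * idxs.length * nfS.length :=
            flat_len idxs nfS
          have harith : 2 * idxs.length * d =
              2 * idxs.length * nfS.length + 2 * idxs.length * (d - nfS.length) := by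
            rw [← Nat.mul_add]
            congr 1
            omega
          exact IH (d - nfS.length) (by omega) nfS seenS
            (fA - ((c :: fr').flatMap (chA idxs)).length) f
            hseen'nd hseen'U hnfU
            (by omega)
            (by omega)
            (by omega)

-- ===== VERDICT (by name: the statement is the Claim_ definition above) =====
theorem bfs_spec : Claim_equal_bfs := by
  intro s idxs _ hPre
  unfold Spec_bfs bfs bfs_alt
  have hcl := uniSet_closed s idxs hPre
  have hN : (uniSet s idxs).length ≤ searchSpace s idxs := uniSet_count s idxs
  have h3 : 1 ≤ searchSpace s idxs := Nat.one_le_pow _ _ (by omega)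
  -- the B side: Kleene iteration from {s} = frontier BFS with frontier [s]
  have hB : bfsKleene idxs (1 + searchSpace s idxs) [s] =
      frontLoop idxs (1 + searchSpace s idxs) [s] [s] := by
    have := kleene_eq_front idxs (1 + searchSpace s idxs) [] [s] (by simp)
      (by intro c hc; simp at hc)
    simpa using this
  rw [hB, ofList_self_of_nodup _ (front_nodup idxs _ [s] [s] (by simp))]
  -- the A side: unfold A's first iteration (pop s, record it, queue its children), then bridge
  have h1 : 1 + 2 * idxs.length * searchSpace s idxs
      = (2 * idxs.length * searchSpace s idxs) + 1 := by omega
  rw [h1]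
  show (if PySem.Set.contains PySem.Set.empty s then _ else _) = _
  rw [if_neg (by simp [PySem.Set.contains, PySem.Set.empty])]
  rw [push_eq]
  have hadd : PySem.Set.add PySem.Set.empty s = [s] := rfl
  rw [hadd]
  have hq : ([] : List String) ++ chA idxs s = [s].flatMap (chA idxs) := by simp
  rw [hq]
  have hge : 2 * idxs.length ≤ 2 * idxs.length * searchSpace s idxs := by
    have := Nat.mul_le_mul_left (2 * idxs.length) h3
    omega
  have harith : 2 * idxs.length + 2 * idxs.length * (searchSpace s idxs - 1) =
      2 * idxs.length * searchSpace s idxs := by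
    rw [Nat.mul_sub, Nat.mul_one]
    omega
  exact main_bridge idxs (uniSet s idxs) hcl (searchSpace s idxs - 1) [s] [s]
    (2 * idxs.length * searchSpace s idxs) (1 + searchSpace s idxs)
    (by simp)
    (by
      intro x hx; simp at hx; subst hx
      exact mem_uniSet x idxs x (growBound_base x idxs) (by intro y hy; simp [hy]))
    (by
      intro x hx; simp at hx; subst hx
      exact mem_uniSet x idxs x (growBound_base x idxs) (by intro y hy; simp [hy]))
    (by simp; omega)
    (by rw [flat_len]; simp; omega)
    (by omega)
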